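-- pv_equiv track=rewrite | github.com/GodishalaAshwith/CompCoding-Streak | CodeChef/Contests/Startes201/3.py | marks
-- ===== SOURCE A (Python) =====
-- def marks(s):
--     n = len(s)
--     i = 0
--     while i < n:
--         if s[i] == '0':
--             i+=1
--             continue
--         j = i
--         while j<n and s[j]=='1':
--             j+=1
--         l = j - i
--         if l<3:
--             return False
--         i = j
--     return True
-- ===== SOURCE B (Python) =====
-- def marks(s):
--     return all(p == "" or (len(p) >= 3 and p == "1" * len(p)) for p in s.split("0"))
-- ===== Notes on version B (the rewrite author's own statement) =====
-- stated objective: idiomatic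
-- what changed: Replaces A's index-based double while-loop scan with a single split on the separator character and an all(...) check that every resulting piece is either empty or an all-ones block of length at least three.
import Mathlib
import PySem

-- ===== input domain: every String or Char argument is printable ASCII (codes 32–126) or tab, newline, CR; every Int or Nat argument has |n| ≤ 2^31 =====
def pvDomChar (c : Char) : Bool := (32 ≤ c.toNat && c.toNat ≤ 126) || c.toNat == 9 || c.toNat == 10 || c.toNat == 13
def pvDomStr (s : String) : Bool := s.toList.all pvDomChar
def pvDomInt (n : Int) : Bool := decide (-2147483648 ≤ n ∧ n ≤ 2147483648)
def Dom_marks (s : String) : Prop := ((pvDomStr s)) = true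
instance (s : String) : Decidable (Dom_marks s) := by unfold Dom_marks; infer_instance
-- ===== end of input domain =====

-- B replaces A's index-based two-level while-loop scan by splitting on '0' and
-- checking every piece with all(...) — objective: more idiomatic, same O(n) cost.

-- ===== PORT A =====
-- inner while loop of A: length of the run of '1's starting at the front (l = j - i)
def marksCountOnes : List Char → Nat
  | [] => 0
  | c :: t => if c = '1' then marksCountOnes t + 1 else 0

-- outer while loop of A over the suffix s[i:]
def marksLoop : List Char → Bool
  | [] => true
  | c :: t =>
    if c = '0' then marksLoop t
    else
      let l := marksCountOnes (c :: t)
      if l < 3 then false else marksLoop (List.drop l (c :: t))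
termination_by cs => cs.length
decreasing_by
  · simp
  · simp only [List.length_drop, List.length_cons]
    omega

def marks (s : String) : Bool := marksLoop s.toList

-- ===== PORT B =====
-- the generator's test: p == "" or (len(p) >= 3 and p == "1" * len(p))
def marksGood (p : List Char) : Bool :=
  p == ([] : List Char) || (decide (3 ≤ p.length) && p == List.replicate p.length '1')

-- s.split("0") ported as List.splitOn '0'; all(...) as List.all
def marks_alt (s : String) : Bool := (List.splitOn '0' s.toList).all marksGood

-- ===== PRECONDITION & SPEC =====
def Spec_marks (s : String) (out : Bool) : Prop := out = marks_alt s
instance (s : String) (out : Bool) : Decidable (Spec_marks s out) := by unfold Spec_marks; infer_instance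

-- ===== CLAIM (what is proved, stated in full; the proofs are below) =====
def Claim_equal_marks : Prop := ∀ (s : String), Dom_marks s → Spec_marks s (marks s)

-- ===== LEMMAS AND PROOFS =====

lemma splitOn_zero_cons (t : List Char) :
    List.splitOn '0' ('0' :: t) = [] :: List.splitOn '0' t := by
  rw [List.splitOn, List.splitOnP_cons]; simp [List.splitOn]

lemma splitOn_cons_ne (c : Char) (t : List Char) (h : ¬ (c = '0')) :
    List.splitOn '0' (c :: t) = (List.splitOn '0' t).modifyHead (c :: ·) := by
  rw [List.splitOn, List.splitOnP_cons]
  simp [h, List.splitOn]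

lemma splitOn_char_ne_nil (l : List Char) : List.splitOn '0' l ≠ [] :=
  List.splitOnP_ne_nil _ l

lemma splitOn_run (k : Nat) (t : List Char) :
    List.splitOn '0' (List.replicate k '1' ++ t)
      = (List.splitOn '0' t).modifyHead (List.replicate k '1' ++ ·) := by
  induction k with
  | zero => cases h : List.splitOn '0' t <;> simp [h]
  | succ k ih =>
      rw [List.replicate_succ, List.cons_append, splitOn_cons_ne _ _ (by decide), ih]
      cases List.splitOn '0' t
      · simp
      · simp

lemma countOnes_decomp (cs : List Char) :
    List.replicate (marksCountOnes cs) '1' ++ List.drop (marksCountOnes cs) cs = cs := by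
  induction cs with
  | nil => simp [marksCountOnes]
  | cons c t ih =>
      by_cases h : c = '1'
      · subst h; simp [marksCountOnes, List.replicate_succ, ih]
      · simp [marksCountOnes, h]

lemma countOnes_drop_head (cs : List Char) :
    (List.drop (marksCountOnes cs) cs).head? ≠ some '1' := by
  induction cs with
  | nil => simp [marksCountOnes]
  | cons c t ih =>
      by_cases h : c = '1'
      · subst h; simpa [marksCountOnes] using ih
      · simp [marksCountOnes, h, List.head?]

lemma good_replicate (k : Nat) (hk : 1 ≤ k) :
    marksGood (List.replicate k '1') = decide (3 ≤ k) := by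
  by_cases h3 : 3 ≤ k <;> simp [marksGood, h3]
  omega

lemma good_run_bad (k : Nat) (d : Char) (hd : ¬ (d = '1')) (h : List Char) :
    marksGood (List.replicate k '1' ++ d :: h) = false := by
  simp only [marksGood, Bool.or_eq_false_iff, Bool.and_eq_false_iff]
  refine ⟨by simp, Or.inr ?_⟩
  simp only [beq_eq_false_iff_ne, ne_eq]
  intro he
  have hm : d ∈ List.replicate k '1' ++ d :: h := by simp
  rw [he] at hm
  exact hd (List.eq_of_mem_replicate hm)

lemma good_cons_ne_one (c : Char) (h : List Char) (h1 : ¬ (c = '1')) :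
    marksGood (c :: h) = false := by
  simp only [marksGood, Bool.or_eq_false_iff, Bool.and_eq_false_iff]
  refine ⟨by simp, Or.inr ?_⟩
  simp only [beq_eq_false_iff_ne, ne_eq, List.length_cons, List.replicate_succ]
  intro he
  exact h1 (List.cons_eq_cons.mp he).1

lemma splitOn_exists_cons (l : List Char) :
    ∃ h tl, List.splitOn '0' l = h :: tl := by
  cases hs : List.splitOn '0' l with
  | nil => exact absurd hs (splitOn_char_ne_nil l)
  | cons a b => exact ⟨a, b, rfl⟩

lemma marksLoop_eq_all : ∀ (n : Nat) (cs : List Char), cs.length ≤ n →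
    marksLoop cs = (List.splitOn '0' cs).all marksGood := by
  intro n
  induction n with
  | zero =>
      intro cs hle
      have : cs = [] := List.eq_nil_of_length_eq_zero (Nat.le_zero.mp hle)
      subst this; simp [marksLoop, List.splitOn, marksGood]
  | succ n ih =>
      intro cs hle
      match cs with
      | [] => simp [marksLoop, List.splitOn, marksGood]
      | c :: t =>
        by_cases h0 : c = '0'
        · subst h0
          rw [splitOn_zero_cons]
          simp only [marksLoop, List.all_cons, reduceIte]
          rw [ih t (by simpa using Nat.lt_succ_iff.mp (Nat.lt_of_lt_of_le (by simp) hle))]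
          simp [marksGood]
        · by_cases h1 : c = '1'
          · subst h1
            have hA : marksLoop ('1' :: t) =
                if marksCountOnes ('1' :: t) < 3 then false
                else marksLoop (List.drop (marksCountOnes ('1' :: t)) ('1' :: t)) := by
              rw [marksLoop]; simp [h0]
            have hk1 : 1 ≤ marksCountOnes ('1' :: t) := by simp [marksCountOnes]
            have hdec := countOnes_decomp ('1' :: t)
            have hhead := countOnes_drop_head ('1' :: t)
            generalize hkg : marksCountOnes ('1' :: t) = k at hA hk1 hdec hhead
            generalize hrg : List.drop k ('1' :: t) = rest at hA hdec hhead
            have hlen : rest.length + k = t.length + 1 := by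
              have := congrArg List.length hdec
              simpa [Nat.add_comm] using this
            rw [hA, ← hdec, splitOn_run]
            cases rest with
            | nil =>
                simp only [List.splitOn_nil, List.modifyHead, List.append_nil,
                  List.all_cons, List.all_nil, Bool.and_true]
                rw [good_replicate k hk1]
                by_cases h3 : k < 3
                · simp [h3, show ¬ 3 ≤ k by omega]
                · simp [h3, show 3 ≤ k by omega, marksLoop]
            | cons d r =>
                by_cases hd0 : d = '0'
                · subst hd0
                  rw [splitOn_zero_cons]
                  have hr : r.length ≤ n := by
                    simp at hlen hle; omega
                  simp only [List.modifyHead, List.all_cons, List.append_nil]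
                  rw [marksLoop, ih r hr, good_replicate k hk1]
                  by_cases h3 : k < 3
                  · simp [h3, show ¬ 3 ≤ k by omega]
                  · simp [h3, show 3 ≤ k by omega]
                · have hd1 : ¬ (d = '1') := by
                    intro hc; subst hc; simp at hhead
                  rw [splitOn_cons_ne d r hd0]
                  obtain ⟨h, tl, hsp⟩ := splitOn_exists_cons r
                  rw [hsp]
                  simp only [List.modifyHead, List.all_cons]
                  rw [good_run_bad k d hd1 h]
                  have hB : marksLoop (d :: r) = false := by
                    rw [marksLoop]
                    simp [hd0, hd1, marksCountOnes]
                  split_ifs with h3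
                  · simp
                  · simp [hB]
          · rw [splitOn_cons_ne c t h0]
            obtain ⟨h, tl, hsp⟩ := splitOn_exists_cons t
            rw [hsp]
            have hA : marksLoop (c :: t) = false := by
              rw [marksLoop]; simp [h0, h1, marksCountOnes]
            rw [hA]
            simp only [List.modifyHead, List.all_cons]
            rw [good_cons_ne_one c h h1]
            simp

-- ===== VERDICT (by name: the statement is the Claim_ definition above) =====
theorem marks_spec : Claim_equal_marks := by
  intro s _
  unfold Spec_marks marks marks_alt
  exact marksLoop_eq_all s.toList.length s.toList (le_refl _)
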